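-- pv_equiv track=rewrite | github.com/UrielMeneses849/ETLMensajero | ETL_Prueba_JSON.py | _sentence_case_spanish
-- ===== SOURCE A (Python) =====
-- def _sentence_case_spanish(s: str) -> str:
--     s = s.lower()
--     out = []
--     cap_next = True
--     for ch in s:
--         if cap_next and ch.isalpha():
--             out.append(ch.upper())
--             cap_next = False
--         else:
--             out.append(ch)
--         if ch in ".!?":
--             cap_next = True
--         if ch == "\n":
--             cap_next = True
--     return "".join(out)
-- ===== SOURCE B (Python) =====
-- def _cap_first(seg: str) -> str:
--     for i, ch in enumerate(seg):
--         if ch.isalpha():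
--             return seg[:i] + ch.upper() + seg[i + 1:]
--     return seg
--
--
-- def _sentence_case_spanish(s: str) -> str:
--     s = s.lower()
--     segs = []
--     cur = []
--     for ch in s:
--         cur.append(ch)
--         if ch in ".!?\n":
--             segs.append("".join(cur))
--             cur = []
--     segs.append("".join(cur))
--     return "".join(_cap_first(seg) for seg in segs)
-- ===== Notes on version B (the rewrite author's own statement) =====
-- stated objective: alternative
-- what changed: Replaces A's single stateful cap_next pass with splitting the lowercased string into segments after each of '.', '!', '?', '\n' and independently capitalizing the first alphabetic character of each segment.
import Mathlib
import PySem

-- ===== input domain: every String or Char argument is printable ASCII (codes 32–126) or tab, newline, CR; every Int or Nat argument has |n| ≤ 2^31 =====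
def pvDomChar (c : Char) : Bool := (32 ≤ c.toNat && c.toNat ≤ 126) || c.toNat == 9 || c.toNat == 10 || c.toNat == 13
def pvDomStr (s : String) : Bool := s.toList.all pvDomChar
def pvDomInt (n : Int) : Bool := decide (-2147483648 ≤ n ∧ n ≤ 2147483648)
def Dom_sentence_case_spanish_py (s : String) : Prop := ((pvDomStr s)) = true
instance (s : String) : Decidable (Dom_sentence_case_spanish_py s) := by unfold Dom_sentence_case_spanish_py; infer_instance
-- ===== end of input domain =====

-- B replaces A's stateful cap_next pass with segment splitting after '.', '!', '?', '\n'
-- plus independent per-segment first-letter capitalization (alternative decomposition, same cost).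

-- ===== PORT A =====
-- A's loop: one char at a time, carrying the cap_next flag; branches in A's order.
def pvRunA : List Char → Bool → List Char
  | [], _ => []
  | ch :: rest, cap =>
    let (out, cap1) :=
      if cap && PySem.Chars.isalpha ch then (PySem.Chars.upperChar ch, false)
      else (ch, cap)
    let cap2 := if ch = '.' || ch = '!' || ch = '?' then true else cap1
    let cap3 := if ch = '\n' then true else cap2
    out :: pvRunA rest cap3

def sentence_case_spanish_py (s : String) : String :=
  String.mk (pvRunA (PySem.Chars.lower s.toList) true)

-- ===== PORT B =====
-- boundary test 'ch in ".!?\n"'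
def pvBdry (ch : Char) : Bool := ch = '.' || ch = '!' || ch = '?' || ch = '\n'

-- _cap_first: uppercase the first alphabetic character of the segment, if any
def pvCapFirst : List Char → List Char
  | [] => []
  | ch :: rest =>
    if PySem.Chars.isalpha ch then PySem.Chars.upperChar ch :: rest
    else ch :: pvCapFirst rest

-- B's segment-building loop step: accumulate the current segment, flush it after a boundary char
def pvSplitStep (acc : List (List Char) × List Char) (ch : Char) : List (List Char) × List Char :=
  if pvBdry ch then (acc.1 ++ [acc.2 ++ [ch]], []) else (acc.1, acc.2 ++ [ch])

def sentence_case_spanish_py_alt (s : String) : String :=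
  let cs := PySem.Chars.lower s.toList
  let p := cs.foldl pvSplitStep ([], [])
  let segs := p.1 ++ [p.2]
  String.mk (PySem.Chars.join [] (segs.map pvCapFirst))

-- ===== PRECONDITION & SPEC =====
def Spec_sentence_case_spanish_py (s : String) (out : String) : Prop := out = sentence_case_spanish_py_alt s
instance (s : String) (out : String) : Decidable (Spec_sentence_case_spanish_py s out) := by unfold Spec_sentence_case_spanish_py; infer_instance

-- ===== CLAIM (what is proved, stated in full; the proofs are below) =====
def Claim_equal_sentence_case_spanish_py : Prop := ∀ (s : String), Dom_sentence_case_spanish_py s → Spec_sentence_case_spanish_py s (sentence_case_spanish_py s)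

-- ===== LEMMAS AND PROOFS =====

-- recursive view of B's segment split: (head segment, remaining segments)
def pvSplitRec : List Char → List Char × List (List Char)
  | [] => ([], [])
  | c :: rest =>
    let p := pvSplitRec rest
    if pvBdry c then ([c], p.1 :: p.2) else (c :: p.1, p.2)

lemma pvBdry_not_alpha {c : Char} (h : pvBdry c = true) : PySem.Chars.isalpha c = false := by
  simp only [pvBdry, Bool.or_eq_true, decide_eq_true_eq] at h
  rcases h with ((h | h) | h) | h <;> subst h <;> decide

lemma pv_foldl_split (l : List Char) : ∀ (segs : List (List Char)) (cur : List Char),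
    (let p := l.foldl pvSplitStep (segs, cur); p.1 ++ [p.2]) =
      segs ++ (cur ++ (pvSplitRec l).1) :: (pvSplitRec l).2 := by
  induction l with
  | nil => intro segs cur; simp [pvSplitRec]
  | cons c rest ih =>
    intro segs cur
    simp only [List.foldl_cons, pvSplitStep, pvSplitRec]
    by_cases hb : pvBdry c = true
    · simp [hb, ih]
    · simp only [Bool.not_eq_true] at hb
      simp [hb, ih]

lemma pv_join_nil (xs : List (List Char)) : PySem.Chars.join [] xs = xs.flatten := by
  induction xs with
  | nil => rfl
  | cons a t ih =>
    cases t with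
    | nil => simp [PySem.Chars.join, List.intercalate]
    | cons b t2 =>
      simp only [PySem.Chars.join] at ih ⊢
      simp [List.intercalate] at ih ⊢
      simpa using ih

lemma pv_runA_split (l : List Char) :
    pvRunA l true = (((pvSplitRec l).1 :: (pvSplitRec l).2).map pvCapFirst).flatten ∧
    pvRunA l false = (pvSplitRec l).1 ++ ((pvSplitRec l).2.map pvCapFirst).flatten := by
  induction l with
  | nil => simp [pvRunA, pvSplitRec, pvCapFirst]
  | cons c rest ih =>
    obtain ⟨ih1, ih0⟩ := ih
    by_cases hb : pvBdry c = true
    · have ha := pvBdry_not_alpha hb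
      have hcap3 : (decide (c = '\n') || (decide (c = '.') || decide (c = '!') || decide (c = '?'))) = true := by
        simp only [pvBdry, Bool.or_eq_true] at hb ⊢; tauto
      constructor <;>
        simp [pvRunA, pvSplitRec, pvCapFirst, ha, hb, hcap3, ih1]
    · simp only [Bool.not_eq_true] at hb
      have hdot : (c = '.' || c = '!' || c = '?') = false := by
        simp only [pvBdry] at hb; simp_all
      have hnl : ¬ (c = '\n') := by
        simp only [pvBdry] at hb; simp_all
      refine ⟨?_, ?_⟩
      · by_cases ha : PySem.Chars.isalpha c = true
        · simp [pvRunA, pvSplitRec, pvCapFirst, ha, hb, hdot, hnl, ih0]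
        · simp only [Bool.not_eq_true] at ha
          simp [pvRunA, pvSplitRec, pvCapFirst, ha, hb, hdot, hnl, ih1]
      · simp [pvRunA, pvSplitRec, hb, hdot, hnl, ih0]

-- ===== VERDICT (by name: the statement is the Claim_ definition above) =====
theorem sentence_case_spanish_py_spec : Claim_equal_sentence_case_spanish_py := by
  intro s _
  unfold Spec_sentence_case_spanish_py sentence_case_spanish_py sentence_case_spanish_py_alt
  have hsplit := pv_foldl_split (PySem.Chars.lower s.toList) [] []
  simp only [List.nil_append] at hsplit
  show String.mk (pvRunA (PySem.Chars.lower s.toList) true) =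
    String.mk (PySem.Chars.join []
      (((List.foldl pvSplitStep ([], []) (PySem.Chars.lower s.toList)).1 ++
        [(List.foldl pvSplitStep ([], []) (PySem.Chars.lower s.toList)).2]).map pvCapFirst))
  rw [hsplit, pv_join_nil, (pv_runA_split (PySem.Chars.lower s.toList)).1]
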